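/- GENERATED by tools/from_farm_form.py from prooffarm-gif/accepted/DGifGetImageHeader.1/Proof.lean (a worked proof of the farm's unit `DGifGetImageHeader.1`,
   accepted by the verdict) — do not edit. -/
import Gif.Spec.Units.DGifGetImageHeader_1
import Gif.Spec.AllSegs
import Gif.Spec.Proved.DGifGetImageHeader_1_Lemmas

open X86 X86.User Asan ProgX.Base ProgX.Base.Spec Gif.Spec

/-!
  `DGifGetImageHeader.1` (0x108e49 … 0x108e78 and 0x108e95 … 0x108ecd, 30 instructions; dgif_lib.c:364-374): A BODY SEGMENT OF A
  PROTECTED FUNCTION WITH THREE CALLS. The checked loads of `gif->Private` and `Private->FileState` (the NOT_READABLE arm is dead: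
  `Shape.state`, the walker prunes it), then `DGifGetWord` for `Image.Left`, `.Top`, `.Width`; a failed word goes to the epilogue's
  cut with `r13d = 0`. The three return addresses (`ret4`, `ret5`, `ret6`) are not cuts of the design, so the unit makes them cuts of
  its own, with the design's assertion `Mid` there (`Body` + `r12 = Private`; the callee's result is needed by no path: a failed word
  needs only `r13d = 0`). Four walks (Lemmas.lean), chained here.
-/

namespace Gif.Spec.DGifGetImageHeader_1
end Gif.Spec.DGifGetImageHeader_1

/-- Segment 1 of `DGifGetImageHeader` takes `AfterPrologue` at 0x108e49 to `Mid` at 0x108ecd or `Done` at 0x108e78. -/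
theorem Gif.Spec.Proved.DGifGetImageHeader_1_ok : Gif.Spec.DGifGetImageHeader_1.Statement := by
  intro Lay hLay μ hμ u₀ hcode h_DGifGetWord h_asan_load8_noabort h_asan_load4_noabort _h_asan_store4_noabort
    H rest frames F R e ret v hat
  -- the callee's contract for the frame list of the body (the own frame in front)
  have hgw := h_DGifGetWord H rest (DGifGetImageHeader.framesIn frames e) F R
  -- 0x108e49 … the first call … 0x108ea1 (ret4)
  refine (Gif.Spec.DGifGetImageHeader_1.gih1_seg_first Lay hLay μ hμ u₀ hcode H rest frames F R e ret hgw
    h_asan_load8_noabort h_asan_load4_noabort v hat).trans ?_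
  intro v1 hv1
  -- 0x108ea1 … the second call … 0x108eb9 (ret5), or the failed word … 0x108e78
  refine (Gif.Spec.DGifGetImageHeader_1.gih1_seg_second Lay hLay μ hμ u₀ hcode H rest frames F R e ret hgw v1 hv1).trans ?_
  intro v2 hv2
  rcases hv2 with hmid2 | hdone2
  · -- 0x108eb9 … the third call … 0x108ec9 (ret6), or the failed word … 0x108e78
    refine (Gif.Spec.DGifGetImageHeader_1.gih1_seg_third Lay hLay μ hμ u₀ hcode H rest frames F R e ret hgw v2 hmid2).trans ?_
    intro v3 hv3
    rcases hv3 with hmid3 | hdone3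
    · -- 0x108ec9 … 0x108ecd, or the failed word … 0x108e78
      exact Gif.Spec.DGifGetImageHeader_1.gih1_seg_fourth Lay hLay μ hμ u₀ hcode H rest frames F R e ret v3 hmid3
    · exact ReachVia.done (Or.inr hdone3)
  · exact ReachVia.done (Or.inr hdone2)
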